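-- pv_equiv track=rewrite | github.com/Trught/ETIM_to_CSV | bme_parser.py | split_key
-- ===== SOURCE A (Python) =====
-- def split_key(k: str):
--     # "FVALUE @lang:de @type:x" -> ("FVALUE", {"lang":"de","type":"x"})
--     parts = str(k).split()
--     tag = parts[0] if parts else ""
--     attrs = {}
--     for p in parts[1:]:
--         if p.startswith("@") and ":" in p[1:]:
--             a, v = p[1:].split(":", 1)
--             attrs[a] = v
--     return tag, attrs
-- ===== SOURCE B (Python) =====
-- def split_key(k):
--     # single left-to-right character scan: no split(), tokens are parsed in place
--     s = str(k)
--     n = len(s)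
--     tag = None
--     attrs = {}
--     i = 0
--     while i < n:
--         if s[i].isspace():
--             i += 1
--         else:
--             j = i + 1
--             while j < n and not s[j].isspace():
--                 j += 1
--             tok = s[i:j]
--             if tag is None:
--                 tag = tok
--             else:
--                 c = tok.find(":", 1)
--                 if tok[0] == "@" and c != -1:
--                     attrs[tok[1:c]] = tok[c + 1:]
--             i = j
--     return ("" if tag is None else tag, attrs)
-- ===== Notes on version B (the rewrite author's own statement) =====
-- stated objective: alternative
-- what changed: A builds the full token list with str.split() and then filters and splits each token; B makes a single left-to-right character scan over the string, carving out each whitespace-delimited token in place and parsing attribute tokens with one find-colon call plus slicing, with no intermediate token list.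
import Mathlib
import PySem

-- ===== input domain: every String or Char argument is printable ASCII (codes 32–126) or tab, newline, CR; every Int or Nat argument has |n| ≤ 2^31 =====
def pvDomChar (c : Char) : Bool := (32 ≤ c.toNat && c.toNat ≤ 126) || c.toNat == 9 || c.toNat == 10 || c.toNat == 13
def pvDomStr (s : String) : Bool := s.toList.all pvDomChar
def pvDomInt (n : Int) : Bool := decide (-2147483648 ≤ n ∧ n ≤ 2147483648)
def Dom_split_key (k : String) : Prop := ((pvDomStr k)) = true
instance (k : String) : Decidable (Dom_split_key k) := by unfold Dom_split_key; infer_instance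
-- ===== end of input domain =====

-- B replaces split()-then-filter with a single character scan that parses the tag and @attr:val tokens in place (alternative decomposition, same cost).


-- ===== PORT A =====
def split_key (k : String) : String × (List (String × String)) :=
  let parts := PySem.Str.split₀ k
  let tag := match parts with | [] => "" | t :: _ => t   -- parts[0] if parts else ""
  let attrs := (parts.drop 1).foldl (fun d p =>
      if PySem.Str.startswith p "@" && PySem.Str.isIn ":" (PySem.Str.slice p (some 1) none) then
        match PySem.Str.splitMax? (PySem.Str.slice p (some 1) none) ":" 1 with
        | some [a, v] => d.insert a v
        | _ => d   -- unreachable: ':' occurs in p[1:], so split(':', 1) yields exactly two pieces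
      else d) (PySem.Dict.empty (κ := String) (ν := String))
  (tag, attrs.items)

-- ===== PORT B =====
-- the outer while loop of Source B: skip whitespace, cut out the next token (the inner while loop
-- is the takeWhile/dropWhile span), handle it, continue after it
def splitKeyGo (cs : List Char) (tag : Option (List Char))
    (attrs : PySem.Dict String String) : String × (List (String × String)) :=
  match cs with
  | [] => ((match tag with | none => "" | some t => String.ofList t), attrs.items)
  | c :: rest =>
    if PySem.Chars.isspace c then splitKeyGo rest tag attrs
    else
      let tok := c :: rest.takeWhile (fun d => !PySem.Chars.isspace d)   -- tok = s[i:j]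
      let rem := rest.dropWhile (fun d => !PySem.Chars.isspace d)
      match tag with
      | none => splitKeyGo rem (some tok) attrs
      | some _ =>
        let ci := PySem.Chars.findFrom tok [':'] 1   -- tok.find(":", 1)
        if c == '@' && ci != -1 then
          splitKeyGo rem tag (attrs.insert (String.ofList (PySem.Chars.slice tok (some 1) (some ci)))
                                           (String.ofList (PySem.Chars.slice tok (some (ci + 1)) none)))
        else splitKeyGo rem tag attrs
  termination_by cs.length
  decreasing_by
    · simp
    · simp; exact List.length_dropWhile_le _ _
    · simp; exact List.length_dropWhile_le _ _
    · simp; exact List.length_dropWhile_le _ _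

def split_key_alt (k : String) : String × (List (String × String)) :=
  splitKeyGo k.toList none PySem.Dict.empty

-- ===== PRECONDITION & SPEC =====
def Spec_split_key (k : String) (out : String × (List (String × String))) : Prop := out = split_key_alt k
instance (k : String) (out : String × (List (String × String))) : Decidable (Spec_split_key k out) := by unfold Spec_split_key; infer_instance

-- ===== CLAIM (what is proved, stated in full; the proofs are below) =====
def Claim_equal_split_key : Prop := ∀ (k : String), Dom_split_key k → Spec_split_key k (split_key k)

-- ===== LEMMAS AND PROOFS =====

-- A's per-token loop body, named so the lemmas can talk about it (split_key uses the same lambda literally)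
def pvAstep (d : PySem.Dict String String) (p : String) : PySem.Dict String String :=
  if PySem.Str.startswith p "@" && PySem.Str.isIn ":" (PySem.Str.slice p (some 1) none) then
    match PySem.Str.splitMax? (PySem.Str.slice p (some 1) none) ":" 1 with
    | some [a, v] => d.insert a v
    | _ => d
  else d

theorem split_key_eq (k : String) :
    split_key k =
      (match PySem.Str.split₀ k with | [] => "" | t :: _ => t,
       (((PySem.Str.split₀ k).drop 1).foldl pvAstep PySem.Dict.empty).items) := rfl

-- the whitespace-token list of a character string, span-style
def pvToks : List Char → List (List Char)
  | [] => []
  | c :: rest =>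
    if PySem.Chars.isspace c then pvToks rest
    else (c :: rest.takeWhile (fun d => !PySem.Chars.isspace d)) :: pvToks (rest.dropWhile (fun d => !PySem.Chars.isspace d))
  termination_by cs => cs.length
  decreasing_by
    · simp
    · simp; exact List.length_dropWhile_le _ _

-- Python's str.split() produces exactly those tokens
theorem pv_go_eq : ∀ (cs : List Char) (cur : List Char) (acc : List (List Char)),
    PySem.Chars.split₀.go cs cur acc =
      acc.reverse ++ (if cur.isEmpty then pvToks cs
        else (cur.reverse ++ cs.takeWhile (fun d => !PySem.Chars.isspace d)) ::
              pvToks (cs.dropWhile (fun d => !PySem.Chars.isspace d))) := by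
  intro cs
  induction cs with
  | nil =>
    intro cur acc
    cases cur <;> simp [PySem.Chars.split₀.go, pvToks]
  | cons c rest ih =>
    intro cur acc
    by_cases hs : PySem.Chars.isspace c
    · cases cur with
      | nil => simp [PySem.Chars.split₀.go, hs, ih, pvToks]
      | cons x xs => simp [PySem.Chars.split₀.go, hs, ih, pvToks]
    · cases cur with
      | nil => simp [PySem.Chars.split₀.go, hs, ih, pvToks]
      | cons x xs => simp [PySem.Chars.split₀.go, hs, ih]

theorem pv_split₀_eq (cs : List Char) : PySem.Chars.split₀ cs = pvToks cs := by
  simp [PySem.Chars.split₀, pv_go_eq]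

-- first occurrence of ':' via List.findIdx
theorem pv_find_go (l : List Char) : ∀ (k : Nat),
    PySem.Chars.find.go [':'] l k =
      if ':' ∈ l then ((k + l.findIdx (· == ':') : Nat) : Int) else -1 := by
  induction l with
  | nil => intro k; simp [PySem.Chars.find.go]
  | cons x rest ih =>
    intro k
    by_cases hx : x = ':'
    · simp [PySem.Chars.find.go, List.isPrefixOf, hx, List.findIdx_cons]
    · have hpre : List.isPrefixOf [':'] (x :: rest) = false := by
        simp [List.isPrefixOf]; exact fun h => hx h.symm
      have hb : (x == ':') = false := by simp [hx]
      simp [PySem.Chars.find.go, hpre, ih, List.findIdx_cons, hb]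
      by_cases hm : ':' ∈ rest
      · simp [hm, Ne.symm hx]; omega
      · simp [hm, Ne.symm hx]

theorem pv_find_mem (l : List Char) (h : ':' ∈ l) :
    PySem.Chars.find l [':'] = ((l.findIdx (· == ':') : Nat) : Int) := by
  simp [PySem.Chars.find, pv_find_go, h]

theorem pv_find_not_mem (l : List Char) (h : ':' ∉ l) :
    PySem.Chars.find l [':'] = -1 := by
  simp [PySem.Chars.find, pv_find_go, h]

theorem pv_splitOnMax_go0 (sep : List Char) (fuel : Nat) (l cur : List Char) (acc : List (List Char)) :
    PySem.Chars.splitOnMax.go sep fuel 0 l cur acc = ((cur.reverse ++ l) :: acc).reverse := by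
  cases fuel with
  | zero => simp [PySem.Chars.splitOnMax.go]
  | succ n => cases l <;> simp [PySem.Chars.splitOnMax.go]

theorem pv_splitOnMax_go1 : ∀ (fuel : Nat) (l cur : List Char) (acc : List (List Char)),
    l.length ≤ fuel → ':' ∈ l →
    PySem.Chars.splitOnMax.go [':'] fuel 1 l cur acc =
      acc.reverse ++ [cur.reverse ++ l.take (l.findIdx (· == ':')), l.drop (l.findIdx (· == ':') + 1)] := by
  intro fuel
  induction fuel with
  | zero => intro l cur acc hl hm; cases l <;> simp_all
  | succ n ih =>
    intro l cur acc hl hm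
    cases l with
    | nil => simp at hm
    | cons x rest =>
      by_cases hx : x = ':'
      · subst hx
        have hpre : List.isPrefixOf [':'] (':' :: rest) = true := by simp [List.isPrefixOf]
        simp [PySem.Chars.splitOnMax.go, hpre, pv_splitOnMax_go0, List.findIdx_cons]
      · have hpre : List.isPrefixOf [':'] (x :: rest) = false := by
          simp [List.isPrefixOf]; exact fun h => hx h.symm
        have hm' : ':' ∈ rest := by cases hm with
          | head => exact absurd rfl hx
          | tail _ h => exact h
        have hl' : rest.length ≤ n := by simp at hl; omega
        have hb : (x == ':') = false := by simp [hx]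
        simp [PySem.Chars.splitOnMax.go, hpre, ih rest (x :: cur) acc hl' hm', List.findIdx_cons, hb]

-- p.split(':', 1) when ':' occurs in p: the two pieces around the first ':'
theorem pv_splitOnMax_one (l : List Char) (h : ':' ∈ l) :
    PySem.Chars.splitOnMax l [':'] 1 =
      [l.take (l.findIdx (· == ':')), l.drop (l.findIdx (· == ':') + 1)] := by
  have : ¬ ((1:Int) < 0) := by norm_num
  simp [PySem.Chars.splitOnMax, this, pv_splitOnMax_go1 (l.length+1) l [] [] (by omega) h]

-- A's token handling and B's token handling agree on any (nonempty) token
theorem pv_step (c : Char) (ps : List Char) (d : PySem.Dict String String) :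
    pvAstep d (String.ofList (c :: ps)) =
      (if c == '@' && PySem.Chars.findFrom (c :: ps) [':'] 1 != -1 then
        d.insert (String.ofList (PySem.Chars.slice (c :: ps) (some 1) (some (PySem.Chars.findFrom (c :: ps) [':'] 1))))
                 (String.ofList (PySem.Chars.slice (c :: ps) (some (PySem.Chars.findFrom (c :: ps) [':'] 1 + 1)) none))
      else d) := by
  have hat : ("@").toList = ['@'] := by decide
  have hco : (":").toList = [':'] := by decide
  have hff : PySem.Chars.findFrom (c :: ps) [':'] 1 =
      if PySem.Chars.find ps [':'] = -1 then -1 else 1 + PySem.Chars.find ps [':'] := by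
    have := PySem.Chars.findFrom_natCast (c :: ps) [':'] 1 (by simp)
    simpa using this
  have hslice1 : PySem.Str.slice (String.ofList (c :: ps)) (some 1) none = String.ofList ps := by
    simp [PySem.Str.slice, PySem.Chars.slice_eq_listSlice, PySem.List.slice_from (a := (1:Int)) _ (by norm_num)]
  have hsw : PySem.Str.startswith (String.ofList (c :: ps)) "@" = (c == '@') := by
    simp [PySem.Str.startswith, PySem.Chars.startswith, List.isPrefixOf, hat, eq_comm]
  by_cases hm : ':' ∈ ps
  · set i := ps.findIdx (· == ':') with hi
    have hfind : PySem.Chars.find ps [':'] = (i : Int) := pv_find_mem ps hm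
    have hne : ¬ ((i : Int) = -1) := by omega
    have hci : PySem.Chars.findFrom (c :: ps) [':'] 1 = 1 + (i : Int) := by
      rw [hff, hfind]; simp [hne]
    have hisin : PySem.Str.isIn ":" (String.ofList ps) = true := by
      simp [PySem.Str.isIn, hco, PySem.Chars.isIn, hfind, hne]
    by_cases hc : c = '@'
    · have hsplit : PySem.Str.splitMax? (String.ofList ps) ":" 1 =
          some [String.ofList (ps.take i), String.ofList (ps.drop (i + 1))] := by
        simp [PySem.Str.splitMax?, PySem.Chars.splitMax?, hco, pv_splitOnMax_one ps hm, hi]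
      have hs1 : PySem.Chars.slice (c :: ps) (some 1) (some (1 + (i:Int))) = ps.take i := by
        rw [PySem.Chars.slice_eq_listSlice]
        have h := PySem.List.slice_natCast (c :: ps) 1 (1 + i)
        simp at h
        push_cast at h
        exact h
      have hs2 : PySem.Chars.slice (c :: ps) (some (1 + (i:Int) + 1)) none = ps.drop (i + 1) := by
        rw [PySem.Chars.slice_eq_listSlice, PySem.List.slice_from _ (by omega)]
        have : (1 + (i:Int) + 1).toNat = i + 2 := by omega
        rw [this]
        simp [List.drop_succ_cons]
      have hcb : (c == '@') = true := by simp [hc]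
      have hne2 : ((1 + (i:Int)) != -1) = true := by simp; omega
      unfold pvAstep
      rw [hsw, hslice1, hisin, hsplit, hci, hs1, hs2, hcb, hne2]
    · have hcb : (c == '@') = false := by simp [hc]
      unfold pvAstep
      rw [hsw, hci, hcb]
      simp
  · have hfind : PySem.Chars.find ps [':'] = -1 := pv_find_not_mem ps hm
    have hci : PySem.Chars.findFrom (c :: ps) [':'] 1 = -1 := by rw [hff, hfind]; simp
    have hisin : PySem.Str.isIn ":" (String.ofList ps) = false := by
      simp [PySem.Str.isIn, hco, PySem.Chars.isIn, hfind]
    unfold pvAstep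
    rw [hsw, hslice1, hisin, hci]
    simp

-- B's scanner computes A's fold over the token list
theorem pv_go_spec : ∀ (cs : List Char) (tag : Option (List Char)) (d : PySem.Dict String String),
    splitKeyGo cs tag d =
      (match tag with
       | some t => (String.ofList t, ((pvToks cs).foldl (fun d p => pvAstep d (String.ofList p)) d).items)
       | none =>
         match pvToks cs with
         | [] => ("", d.items)
         | t :: rest => (String.ofList t, (rest.foldl (fun d p => pvAstep d (String.ofList p)) d).items)) := by
  intro cs tag d
  fun_induction splitKeyGo cs tag d with
  | case1 tag attrs => cases tag <;> simp [pvToks]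
  | case2 tag attrs c rest hs ih => rw [ih]; cases tag <;> simp [pvToks, hs]
  | case3 attrs c rest hs tok rem ih =>
    have htoks : pvToks (c :: rest) = tok :: pvToks rem := by
      simp only [pvToks, hs, if_false, Bool.false_eq_true]; rfl
    rw [ih, htoks]
  | case4 attrs c rest hs tok rem t ci hc ih =>
    have htoks : pvToks (c :: rest) = tok :: pvToks rem := by
      simp only [pvToks, hs, if_false, Bool.false_eq_true]; rfl
    rw [ih, htoks, List.foldl_cons]
    have hstep := pv_step c (rest.takeWhile (fun d => !PySem.Chars.isspace d)) attrs
    rw [hstep, if_pos hc]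
  | case5 attrs c rest hs tok rem t ci hc ih =>
    have htoks : pvToks (c :: rest) = tok :: pvToks rem := by
      simp only [pvToks, hs, if_false, Bool.false_eq_true]; rfl
    rw [ih, htoks, List.foldl_cons]
    have hstep := pv_step c (rest.takeWhile (fun d => !PySem.Chars.isspace d)) attrs
    rw [hstep, if_neg hc]

-- ===== VERDICT (by name: the statement is the Claim_ definition above) =====
theorem split_key_spec : Claim_equal_split_key := by
  intro k _
  unfold Spec_split_key split_key_alt
  rw [split_key_eq, pv_go_spec]
  have hsp : PySem.Str.split₀ k = (pvToks k.toList).map String.ofList := by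
    simp [PySem.Str.split₀, pv_split₀_eq]
  rw [hsp]
  cases h : pvToks k.toList with
  | nil => simp
  | cons t rest => simp [List.foldl_map]
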